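-- pv_equiv track=rewrite | github.com/jccardonar/pmacct | telemetry/decoders/v3/gnmi_utils.py | split_gnmi
-- ===== SOURCE A (Python) =====
-- E = "\\"
--
-- def split_gnmi(path, sch):
--     """
--     Escaping in gnmi paths is only inside the predicate
--     and for \\ and ], we leverage this for this psemi-general function.
--     """
--     current_step = []
--     in_predicate = False
--     for n, ch in enumerate(path):
--         # we aadd it as long as it is not a breakpoint
--         add = True
--         if ch == "]":
--             if in_predicate and path[n - 1] != E:
--                 in_predicate = False
--
--         if ch == sch and not in_predicate:
--             yield "".join(current_step)
--             current_step = []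
--             # this is the only breaking point, we must continue processing in case this
--             # is also [
--             add = False
--
--         if ch == "[":
--             in_predicate = True
--
--         if add:
--             current_step.append(ch)
--
--     if current_step:
--         yield "".join(current_step)
-- ===== SOURCE B (Python) =====
-- E = "\\"
--
-- def split_gnmi(path, sch):
--     # Two passes: record split indices with the predicate state machine,
--     # then yield slices of path between them; return value only (both are generators).
--     boundaries = []
--     in_predicate = False
--     for n, ch in enumerate(path):
--         if ch == "]" and in_predicate and path[n - 1] != E:
--             in_predicate = False
--         if ch == sch and not in_predicate:
--             boundaries.append(n)
--         if ch == "[":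
--             in_predicate = True
--     prev = 0
--     for idx in boundaries:
--         yield path[prev:idx]
--         prev = idx + 1
--     tail = path[prev:]
--     if tail:
--         yield tail
-- ===== Notes on version B (the rewrite author's own statement) =====
-- stated objective: alternative
-- what changed: B runs the in_predicate state machine once only to record the split indices, then produces the output segments as slices path[prev:idx] in a second pass, instead of A's single pass that accumulates characters into current_step and joins them at each separator.
import Mathlib
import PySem

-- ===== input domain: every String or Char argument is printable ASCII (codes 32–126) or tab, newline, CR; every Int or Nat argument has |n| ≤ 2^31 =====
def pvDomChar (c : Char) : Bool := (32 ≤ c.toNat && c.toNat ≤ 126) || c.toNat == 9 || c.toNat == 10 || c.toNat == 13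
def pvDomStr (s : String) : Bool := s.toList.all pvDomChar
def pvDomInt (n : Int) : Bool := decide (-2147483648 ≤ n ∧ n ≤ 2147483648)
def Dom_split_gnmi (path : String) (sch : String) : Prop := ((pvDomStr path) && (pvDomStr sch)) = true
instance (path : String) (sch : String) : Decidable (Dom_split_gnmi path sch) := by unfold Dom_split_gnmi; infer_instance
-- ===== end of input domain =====

-- B records split indices in one pass and slices the path in a second pass,
-- instead of A's single pass accumulating characters; alternative decomposition, same cost.
-- Both Pythons are generators; the equivalence is about the yielded sequence (the return value).

-- ===== PORT A =====
-- the loop of A: state = (current_step, in_predicate); emits on each separator, plus the tail if nonempty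
def splitA_loop (cs : List Char) (sch : String) : List (Int × Char) → List Char → Bool → List String
  | [], cur, _ => if cur ≠ [] then [String.ofList cur] else []
  | (n, ch) :: rest, cur, ip =>
    let ip1 := if ch = ']' ∧ ip = true ∧ PySem.List.pyGet? cs (n - 1) ≠ some '\\' then false else ip
    let ip2 := if ch = '[' then true else ip1
    if String.singleton ch = sch ∧ ip1 = false then
      String.ofList cur :: splitA_loop cs sch rest [] ip2
    else
      splitA_loop cs sch rest (cur ++ [ch]) ip2

def split_gnmi (path : String) (sch : String) : List String :=
  splitA_loop path.toList sch (PySem.List.enumerate path.toList 0) [] false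

-- ===== PORT B =====
-- pass 1: the same state machine, but only recording the indices where a split occurs
def splitB_bounds (cs : List Char) (sch : String) : List (Int × Char) → Bool → List Int
  | [], _ => []
  | (n, ch) :: rest, ip =>
    let ip1 := if ch = ']' ∧ ip = true ∧ PySem.List.pyGet? cs (n - 1) ≠ some '\\' then false else ip
    let ip2 := if ch = '[' then true else ip1
    if String.singleton ch = sch ∧ ip1 = false then
      n :: splitB_bounds cs sch rest ip2
    else
      splitB_bounds cs sch rest ip2

-- pass 2: slice between consecutive boundaries; the final tail only if nonempty
def splitB_emit (cs : List Char) : Int → List Int → List String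
  | prev, [] =>
    let tail := PySem.List.slice cs (some prev) none
    if tail ≠ [] then [String.ofList tail] else []
  | prev, i :: bs =>
    String.ofList (PySem.List.slice cs (some prev) (some i)) :: splitB_emit cs (i + 1) bs

def split_gnmi_alt (path : String) (sch : String) : List String :=
  splitB_emit path.toList 0 (splitB_bounds path.toList sch (PySem.List.enumerate path.toList 0) false)

-- ===== PRECONDITION & SPEC =====
def Spec_split_gnmi (path : String) (sch : String) (out : List String) : Prop := out = split_gnmi_alt path sch
instance (path : String) (sch : String) (out : List String) : Decidable (Spec_split_gnmi path sch out) := by unfold Spec_split_gnmi; infer_instance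

-- ===== CLAIM (what is proved, stated in full; the proofs are below) =====
def Claim_equal_split_gnmi : Prop := ∀ (path : String) (sch : String), Dom_split_gnmi path sch → Spec_split_gnmi path sch (split_gnmi path sch)

-- ===== LEMMAS AND PROOFS =====

-- invariant: processing the enumerate of the suffix cs.drop k starting at index k, with
-- A's accumulator equal to the slice cs[prev:k], both sides agree.
theorem split_loop_eq (cs : List Char) (sch : String) :
    ∀ (suf : List Char) (k p : Nat) (ip : Bool),
      suf = cs.drop k → p ≤ k →
      splitA_loop cs sch (PySem.List.enumerate suf (k : Int)) ((cs.take k).drop p) ip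
        = splitB_emit cs (p : Int) (splitB_bounds cs sch (PySem.List.enumerate suf (k : Int)) ip) := by
  intro suf
  induction suf with
  | nil =>
    intro k p ip hsuf hpk
    have hk : cs.length ≤ k := by
      by_contra h
      push Not at h
      have := List.drop_eq_nil_iff.mp hsuf.symm
      omega
    have htake : cs.take k = cs := List.take_of_length_le hk
    simp only [PySem.List.enumerate, splitA_loop, splitB_bounds, splitB_emit]
    rw [PySem.List.slice_from_natCast, htake]
  | cons ch rest ih =>
    intro k p ip hsuf hpk
    have hklt : k < cs.length := by
      by_contra h
      push Not at h
      rw [List.drop_of_length_le h] at hsuf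
      exact (List.cons_ne_nil _ _) hsuf
    have hsplit : cs = cs.take k ++ ch :: rest := by
      conv_lhs => rw [← List.take_append_drop k cs]
      rw [← hsuf]
    have hlen : (cs.take k).length = k := by simp; omega
    have htk1 : cs.take (k + 1) = cs.take k ++ [ch] := by
      conv_lhs => rw [hsplit]
      rw [List.take_append, hlen]
      simp
    have hrest : rest = cs.drop (k + 1) := by
      have : cs.drop (k + 1) = (cs.drop k).drop 1 := by rw [List.drop_drop]
      rw [this, ← hsuf]; rfl
    rw [PySem.List.enumerate_cons]
    simp only [splitA_loop, splitB_bounds]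
    set ip1 := if ch = ']' ∧ ip = true ∧ PySem.List.pyGet? cs ((k : Int) - 1) ≠ some '\\' then false else ip with hip1
    set ip2 := if ch = '[' then true else ip1 with hip2
    by_cases hsep : String.singleton ch = sch ∧ ip1 = false
    · simp only [if_pos hsep, splitB_emit]
      have hslice : PySem.List.slice cs (some (p : Int)) (some (k : Int)) = (cs.take k).drop p := by
        rw [PySem.List.slice_natCast, List.drop_take]
      rw [hslice]
      have hcast : ((k : Int) + 1) = ((k + 1 : Nat) : Int) := by push_cast; ring
      have hemp : ((cs.take (k + 1)).drop (k + 1)) = ([] : List Char) := by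
        apply List.drop_eq_nil_iff.mpr
        simp [List.length_take]
      have := ih (k + 1) (k + 1) ip2 hrest (le_refl _)
      rw [hemp] at this
      rw [hcast, this]
    · simp only [if_neg hsep]
      have hcast : ((k : Int) + 1) = ((k + 1 : Nat) : Int) := by push_cast; ring
      have hacc : (cs.take (k + 1)).drop p = (cs.take k).drop p ++ [ch] := by
        rw [htk1, List.drop_append_of_le_length (by omega)]
      have := ih (k + 1) p ip2 hrest (by omega)
      rw [hacc] at this
      rw [hcast, this]

-- ===== VERDICT (by name: the statement is the Claim_ definition above) =====
theorem split_gnmi_spec : Claim_equal_split_gnmi := by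
  intro path sch _
  unfold Spec_split_gnmi split_gnmi split_gnmi_alt
  have h := split_loop_eq path.toList sch path.toList 0 0 false (by simp) (le_refl _)
  simpa using h
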